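-- pv_equiv track=rewrite | github.com/hurenkam/AoC | 2020/Day04/solve.py | IsHeightValid
-- ===== SOURCE A (Python) =====
-- def IsHeightValid(hgt):
--     post = hgt[-2:]
--     pre = hgt[:-2]
--
--     if (len(pre) < 1) or (len(post)!=2):
--         return False
--
--     if (post not in ["cm","in"]):
--         return False
--
--     for c in pre:
--         if c not in "0123456789":
--             return False
--
--     number = int(pre)
--
--     if ((post == "in") and (number >= 59) and (number <= 76)):
--         return True
--
--     if ((post == "cm") and (number >= 150) and (number <= 193)):
--         return True
--
--     return False
-- ===== SOURCE B (Python) =====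
-- def IsHeightValid(hgt):
--     # Scan the maximal digit prefix from the front, then dispatch on the exact
--     # remaining unit suffix ("in"/"cm") and check its range.
--     i = 0
--     while i < len(hgt) and hgt[i] in "0123456789":
--         i += 1
--     if i == 0:
--         return False
--     unit = hgt[i:]
--     n = int(hgt[:i])
--     if unit == "in":
--         return 59 <= n <= 76
--     if unit == "cm":
--         return 150 <= n <= 193
--     return False
-- ===== Notes on version B (the rewrite author's own statement) =====
-- stated objective: alternative
-- what changed: Instead of slicing off the last two characters and then checking every prefix character for digit-hood, B scans the maximal digit prefix from the front in one pass and dispatches on the exact remaining suffix ("in"/"cm").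
import Mathlib
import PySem

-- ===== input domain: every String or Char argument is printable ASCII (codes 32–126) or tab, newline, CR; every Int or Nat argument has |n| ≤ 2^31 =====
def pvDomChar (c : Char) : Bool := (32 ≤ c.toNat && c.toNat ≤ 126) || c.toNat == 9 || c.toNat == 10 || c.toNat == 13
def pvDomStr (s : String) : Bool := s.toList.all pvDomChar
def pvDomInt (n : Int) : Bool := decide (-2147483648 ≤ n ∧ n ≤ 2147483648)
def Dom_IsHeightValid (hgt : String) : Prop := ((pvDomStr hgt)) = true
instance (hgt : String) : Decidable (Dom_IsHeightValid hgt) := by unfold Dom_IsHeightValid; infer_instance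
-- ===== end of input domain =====

-- B replaces A's slice-the-suffix-then-test-every-prefix-char parse by a single front
-- scan of the maximal digit prefix followed by an exact-suffix dispatch (objective: alternative).

-- ===== PORT A =====
-- `c in "0123456789"` (one-character membership in a string), shared literally by both Pythons
def isDigitCh (c : Char) : Bool := PySem.Chars.isIn [c] "0123456789".toList

-- A's `for c in pre: if c not in "0123456789": return False` loop
def chkDigits : List Char → Bool
  | [] => true
  | c :: r => if isDigitCh c then chkDigits r else false

def IsHeightValid (hgt : String) : Bool :=
  let l := hgt.toList
  let post := PySem.List.slice l (some (-2)) none      -- hgt[-2:]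
  let pre := PySem.List.slice l none (some (-2))       -- hgt[:-2]
  if pre.length < 1 ∨ post.length ≠ 2 then false
  else if ¬ (post = "cm".toList ∨ post = "in".toList) then false
  else if chkDigits pre = false then false
  else
    match PySem.Int.ofChars? pre with                  -- int(pre); `none` unreachable: pre is nonempty digits
    | none => false
    | some number =>
      if post = "in".toList ∧ 59 ≤ number ∧ number ≤ 76 then true
      else if post = "cm".toList ∧ 150 ≤ number ∧ number ≤ 193 then true
      else false

-- ===== PORT B =====
-- B's `while i < len(hgt) and hgt[i] in "0123456789": i += 1` front scan
def scanDigits : List Char → Nat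
  | [] => 0
  | c :: r => if isDigitCh c then scanDigits r + 1 else 0

def IsHeightValid_alt (hgt : String) : Bool :=
  let l := hgt.toList
  let i := scanDigits l
  if i = 0 then false
  else
    let unit := l.drop i                               -- hgt[i:], exact since 0 ≤ i ≤ len
    let n := (PySem.Int.ofChars? (l.take i)).getD 0    -- int(hgt[:i]); always some: nonempty digits
    if unit = "in".toList then decide (59 ≤ n ∧ n ≤ 76)
    else if unit = "cm".toList then decide (150 ≤ n ∧ n ≤ 193)
    else false

-- ===== PRECONDITION & SPEC =====
def Spec_IsHeightValid (hgt : String) (out : Bool) : Prop := out = IsHeightValid_alt hgt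
instance (hgt : String) (out : Bool) : Decidable (Spec_IsHeightValid hgt out) := by unfold Spec_IsHeightValid; infer_instance

-- ===== CLAIM (what is proved, stated in full; the proofs are below) =====
def Claim_equal_IsHeightValid : Prop := ∀ (hgt : String), Dom_IsHeightValid hgt → Spec_IsHeightValid hgt (IsHeightValid hgt)

-- ===== LEMMAS AND PROOFS =====

theorem slice_pre (l : List Char) : PySem.List.slice l none (some (-2)) = l.take (l.length - 2) := by
  simp only [PySem.List.slice, PySem.List.clampIdx]
  split_ifs <;> simp_all <;> omega

theorem slice_post (l : List Char) : PySem.List.slice l (some (-2)) none = l.drop (l.length - 2) := by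
  simp only [PySem.List.slice, PySem.List.clampIdx]
  split_ifs <;> simp_all <;> try omega
  · rw [Nat.sub_eq_zero_of_le (by omega), List.drop_zero]
  · have h2 : ((l.length : Int) + -2).toNat = l.length - 2 := by omega
    rw [h2]
    exact List.take_of_length_le (by simp)

theorem scan_le (l : List Char) : scanDigits l ≤ l.length := by
  induction l with
  | nil => simp [scanDigits]
  | cons c r ih => simp only [scanDigits, List.length_cons]; split_ifs <;> omega

theorem chk_take_scan (l : List Char) : chkDigits (l.take (scanDigits l)) = true := by
  induction l with
  | nil => simp [scanDigits, chkDigits]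
  | cons c r ih =>
    by_cases h : isDigitCh c = true
    · simp [scanDigits, chkDigits, h, ih]
    · simp [scanDigits, chkDigits, h]

theorem scan_append (p r : List Char) (h : chkDigits p = true) :
    scanDigits (p ++ r) = p.length + scanDigits r := by
  induction p with
  | nil => simp
  | cons c q ih =>
    by_cases hc : isDigitCh c = true
    · simp only [chkDigits, hc, if_true] at h
      simp [scanDigits, hc, ih h]
      omega
    · simp [chkDigits, hc] at h

-- ===== VERDICT (by name: the statement is the Claim_ definition above) =====
theorem IsHeightValid_spec : Claim_equal_IsHeightValid := by
  intro hgt _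
  unfold Spec_IsHeightValid IsHeightValid IsHeightValid_alt
  simp only [slice_pre, slice_post]
  generalize hgt.toList = l
  by_cases h0 : scanDigits l = 0
  · -- B returns false; show A does too
    rw [if_pos h0]
    cases l with
    | nil => simp
    | cons c r =>
      have hc : isDigitCh c = false := by
        cases h : isDigitCh c
        · rfl
        · simp [scanDigits, h] at h0
      rcases Nat.eq_zero_or_pos ((c :: r).length - 2) with hn | hn
      · have hr : r.length ≤ 1 := by simp at hn; omega
        simp
        intros
        omega
      · obtain ⟨m, hm⟩ : ∃ m, (c :: r).length - 2 = m + 1 := ⟨(c :: r).length - 3, by omega⟩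
        rw [hm, List.take_succ_cons]
        split_ifs with g1 g2 g3 <;> try rfl
        exact absurd (by simp [chkDigits, hc] : chkDigits (c :: List.take m r) = false) g3
  · -- the digit prefix is nonempty
    rw [if_neg h0]
    by_cases hu : List.drop (scanDigits l) l = "in".toList ∨ List.drop (scanDigits l) l = "cm".toList
    · -- the rest is exactly a unit: A's pre/post are B's take/drop, branches agree
      have h1 : (List.drop (scanDigits l) l).length = 2 := by
        rcases hu with h | h <;> rw [h] <;> decide
      have hlen : l.length = scanDigits l + 2 := by
        have := scan_le l
        simp at h1
        omega
      have hpre : l.length - 2 = scanDigits l := by omega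
      rw [hpre]
      have hchk : chkDigits (List.take (scanDigits l) l) = true := chk_take_scan l
      have hplen : (List.take (scanDigits l) l).length = scanDigits l := by
        simp [scan_le l]
      rcases hu with h | h <;>
        rw [h] <;>
        rw [if_neg (by rw [hplen]; simp; omega)] <;>
        rw [if_neg (by decide)] <;>
        rw [if_neg (by simp [hchk])] <;>
        cases hof : PySem.Int.ofChars? (List.take (scanDigits l) l) <;>
        simp
    · -- the rest is not a unit: B is false, and A cannot pass all its guards
      have hbf : ¬(List.drop (scanDigits l) l = "in".toList) ∧
                 ¬(List.drop (scanDigits l) l = "cm".toList) := by tauto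
      rw [if_neg hbf.1, if_neg hbf.2]
      split_ifs with g1 g2 g3 <;> try rfl
      exfalso
      -- A passed all guards: pre = take (n-2) l is nonempty digits and
      -- post = drop (n-2) l ∈ {cm,in}; then scanDigits l = n-2, contradicting hu
      simp only [Bool.not_eq_false] at g3
      have hsplit : l = List.take (l.length - 2) l ++ List.drop (l.length - 2) l :=
        (List.take_append_drop _ _).symm
      have hscanpost : scanDigits (List.drop (l.length - 2) l) = 0 := by
        rcases g2 with h | h <;> rw [h] <;> decide
      have hplen : (List.take (l.length - 2) l).length = l.length - 2 := by
        have h1 : ¬((List.take (l.length - 2) l).length < 1) := fun h => g1 (Or.inl h)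
        simp at h1 ⊢
      have hs : scanDigits l = l.length - 2 := by
        conv_lhs => rw [hsplit]
        rw [scan_append _ _ g3, hscanpost, hplen]
        omega
      rcases g2 with h | h
      · rw [hs] at hu
        exact hu (Or.inr h)
      · rw [hs] at hu
        exact hu (Or.inl h)
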